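-- pv_equiv track=rewrite | github.com/Yarmii/Python | Python/main10.3.py | compute_square_sums
-- ===== SOURCE A (Python) =====
-- def compute_square_sums(matrix, N, M):
--     # Шаг 1: Вычисление сумм для горизонтальных полос
--     horizontal_sums = [[0] * (N - M + 1) for _ in range(N)]
--     for i in range(N):
--         # Вычисляем сумму для первого прямоугольника в строке
--         horizontal_sums[i][0] = sum(matrix[i][0:M])
--         # Вычисляем суммы для остальных прямоугольников с использованием скользящего окна
--         for j in range(1, N - M + 1):
--             horizontal_sums[i][j] = horizontal_sums[i][j - 1] - matrix[i][j - 1] + matrix[i][j + M - 1]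
--
--     # Шаг 2: Вычисление сумм для квадратов M x M
--     square_sums = [[0] * (N - M + 1) for _ in range(N - M + 1)]
--     # Вычисляем сумму для первого квадрата
--     for j in range(N - M + 1):
--         square_sums[0][j] = sum(horizontal_sums[i][j] for i in range(M))
--     # Вычисляем суммы для остальных квадратов с использованием скользящего окна
--     for i in range(1, N - M + 1):
--         for j in range(N - M + 1):
--             square_sums[i][j] = square_sums[i - 1][j] - horizontal_sums[i - 1][j] + horizontal_sums[i + M - 1][j]
--
--     return square_sums
-- ===== SOURCE B (Python) =====
-- def compute_square_sums(matrix, N, M):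
--     # 2D prefix-sum (summed-area) table, then each MxM sum by the 4-corner formula.
--     K = N - M + 1
--     P = [[0] * (N + 1)]
--     for i in range(1, N + 1):
--         row = [0]
--         for j in range(1, N + 1):
--             row.append(P[i - 1][j] + row[j - 1] - P[i - 1][j - 1] + matrix[i - 1][j - 1])
--         P.append(row)
--     return [[P[i + M][j + M] - P[i][j + M] - P[i + M][j] + P[i][j]
--              for j in range(K)] for i in range(K)]
-- ===== Notes on version B (the rewrite author's own statement) =====
-- stated objective: alternative
-- what changed: A fills a horizontal sliding-window table and then slides square sums row by row; B builds a 2D prefix-sum (summed-area) table once and computes every MxM sum independently by the 4-corner formula.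
-- outside the precondition, e.g. on compute_square_sums([[0]], -2, -2): A returns [[0]], B raises IndexError; on compute_square_sums([[1, 2, 3], [4], [5, 6, 7], [8, 9, 1], [2, 3, 4]], 5, 5): A returns [[55]], B raises IndexError
import Mathlib
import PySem

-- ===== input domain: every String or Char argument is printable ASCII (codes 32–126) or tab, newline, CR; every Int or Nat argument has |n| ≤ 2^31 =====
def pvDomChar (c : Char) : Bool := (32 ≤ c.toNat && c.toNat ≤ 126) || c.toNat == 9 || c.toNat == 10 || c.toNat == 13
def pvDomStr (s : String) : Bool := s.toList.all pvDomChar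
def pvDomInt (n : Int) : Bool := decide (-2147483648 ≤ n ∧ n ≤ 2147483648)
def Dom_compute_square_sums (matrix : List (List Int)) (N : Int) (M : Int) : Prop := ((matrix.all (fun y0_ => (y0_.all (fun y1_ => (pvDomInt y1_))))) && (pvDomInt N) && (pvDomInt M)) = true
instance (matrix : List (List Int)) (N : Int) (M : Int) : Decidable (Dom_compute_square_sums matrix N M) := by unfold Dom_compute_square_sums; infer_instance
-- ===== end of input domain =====

-- B replaces A's chained sliding-window recurrences by a 2D prefix-sum (summed-area) table
-- queried with the 4-corner formula (objective: alternative; same asymptotic cost).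

-- shared Python 2D-array helpers: xs[i][j] read / write with Python-exact indexing
def pvGet2 (xs : List (List Int)) (i j : Int) : Int :=
  PySem.List.pyGetD (PySem.List.pyGetD xs i []) j 0

def pvSet2 (xs : List (List Int)) (i j : Int) (v : Int) : List (List Int) :=
  PySem.List.pySetD xs i (PySem.List.pySetD (PySem.List.pyGetD xs i []) j v)

-- ===== PORT A =====
def compute_square_sums (matrix : List (List Int)) (N : Int) (M : Int) : List (List Int) :=
  let hs0 : List (List Int) := List.replicate N.toNat (List.replicate (N - M + 1).toNat 0)
  let hs := (PySem.List.pyRange 0 N 1).foldl (fun hs i =>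
      let hs := pvSet2 hs i 0 (PySem.List.slice (PySem.List.pyGetD matrix i []) (some 0) (some M)).sum
      (PySem.List.pyRange 1 (N - M + 1) 1).foldl (fun hs j =>
        pvSet2 hs i j (pvGet2 hs i (j - 1) - pvGet2 matrix i (j - 1) + pvGet2 matrix i (j + M - 1))) hs)
    hs0
  let ss0 : List (List Int) := List.replicate (N - M + 1).toNat (List.replicate (N - M + 1).toNat 0)
  let ss1 := (PySem.List.pyRange 0 (N - M + 1) 1).foldl (fun ss j =>
      pvSet2 ss 0 j ((PySem.List.pyRange 0 M 1).map (fun i => pvGet2 hs i j)).sum) ss0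
  (PySem.List.pyRange 1 (N - M + 1) 1).foldl (fun ss i =>
      (PySem.List.pyRange 0 (N - M + 1) 1).foldl (fun ss j =>
        pvSet2 ss i j (pvGet2 ss (i - 1) j - pvGet2 hs (i - 1) j + pvGet2 hs (i + M - 1) j)) ss)
    ss1

-- ===== PORT B =====
def compute_square_sums_alt (matrix : List (List Int)) (N : Int) (M : Int) : List (List Int) :=
  let K := N - M + 1
  let P := (PySem.List.pyRange 1 (N + 1) 1).foldl (fun (P : List (List Int)) i =>
      P ++ [(PySem.List.pyRange 1 (N + 1) 1).foldl (fun (row : List Int) j =>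
          row ++ [pvGet2 P (i - 1) j + PySem.List.pyGetD row (j - 1) 0
                  - pvGet2 P (i - 1) (j - 1) + pvGet2 matrix (i - 1) (j - 1)]) [0]])
    [List.replicate (N + 1).toNat 0]
  (PySem.List.pyRange 0 K 1).map (fun i =>
    (PySem.List.pyRange 0 K 1).map (fun j =>
      pvGet2 P (i + M) (j + M) - pvGet2 P i (j + M) - pvGet2 P (i + M) j + pvGet2 P i j))

-- ===== PRECONDITION & SPEC =====
-- Pre_ admits the well-formed case 0 ≤ M ≤ N with at least N rows, the first N of length ≥ N each,
-- plus the degenerate case N ≤ 0 with a non-positive window count, where both programs return [].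
-- It excludes the inputs where A raises IndexError (missing rows/columns, M > N ≥ 1) and the ragged
-- or negative-size corners where A still returns a value only because Python slice clamping /
-- empty generator sums silently produce one — B's prefix pass naturally raises there.
def Pre_compute_square_sums (matrix : List (List Int)) (N : Int) (M : Int) : Prop :=
  (0 ≤ M ∧ M ≤ N ∧ N ≤ (matrix.length : Int) ∧
    ∀ row ∈ matrix.take N.toNat, N ≤ (row.length : Int))
  ∨ (N ≤ 0 ∧ N - M + 1 ≤ 0)
instance (matrix : List (List Int)) (N : Int) (M : Int) : Decidable (Pre_compute_square_sums matrix N M) := by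
  unfold Pre_compute_square_sums; infer_instance

def pvWitness_compute_square_sums : List (List Int) × Int × Int := ([[1, 2], [3, 4]], 2, 1)

def Spec_compute_square_sums (matrix : List (List Int)) (N : Int) (M : Int) (out : List (List Int)) : Prop := out = compute_square_sums_alt matrix N M
instance (matrix : List (List Int)) (N : Int) (M : Int) (out : List (List Int)) : Decidable (Spec_compute_square_sums matrix N M out) := by unfold Spec_compute_square_sums; infer_instance

-- ===== CLAIM (what is proved, stated in full; the proofs are below) =====
def Claim_equal_compute_square_sums : Prop := ∀ (matrix : List (List Int)) (N : Int) (M : Int), Dom_compute_square_sums matrix N M → Pre_compute_square_sums matrix N M → Spec_compute_square_sums matrix N M (compute_square_sums matrix N M)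

-- ===== LEMMAS AND PROOFS =====

-- the matrix entry mx[a][b] (0 out of range, as both ports' total reads give)
def pvM (mx : List (List Int)) (a b : Nat) : Int := (mx.getD a []).getD b 0
-- horizontal window sum, M'×M' square sum, 2D prefix sum
def pvH (mx : List (List Int)) (M' i j : Nat) : Int := ∑ b ∈ Finset.range M', pvM mx i (j + b)
def pvS (mx : List (List Int)) (M' i j : Nat) : Int := ∑ a ∈ Finset.range M', pvH mx M' (i + a) j
def pvP (mx : List (List Int)) (i j : Nat) : Int := ∑ a ∈ Finset.range i, ∑ b ∈ Finset.range j, pvM mx a b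
-- a row being filled left to right: first s target values, zeros beyond
def pvPartial (target : Nat → Int) (C s : Nat) : List Int :=
  (List.range s).map target ++ List.replicate (C - s) 0
-- a 2D state whose row t is being rewritten
def pvState (g : Nat → List Int) (R t : Nat) (row : List Int) : List (List Int) :=
  (List.range R).map (fun r => if r = t then row else g r)

lemma pv_peel (c : Nat → Int) (n : Nat) :
    (List.range (n+1)).map c = (List.range n).map c ++ [c n] := by
  rw [List.range_succ, List.map_append, List.map_cons, List.map_nil]
lemma pv_sum_getD (xs : List Int) : xs.sum = ∑ i ∈ Finset.range xs.length, xs.getD i 0 := by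
  induction xs with
  | nil => simp
  | cons x t ih => simp [List.length_cons, Finset.sum_range_succ', ih]; ring
lemma pv_sum_take (xs : List Int) (n : Nat) (h : n ≤ xs.length) :
    (xs.take n).sum = ∑ i ∈ Finset.range n, xs.getD i 0 := by
  rw [pv_sum_getD, xs.length_take, min_eq_left h]
  refine Finset.sum_congr rfl fun i hi => ?_
  simp at hi
  simp [List.getD_eq_getElem?_getD, List.getElem?_take_of_lt hi]
lemma pv_sum_map_range (n : Nat) (f : Nat → Int) :
    ((List.range n).map f).sum = ∑ i ∈ Finset.range n, f i := rfl
lemma pvH_succ (mx : List (List Int)) (M' i j : Nat) :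
    pvH mx M' i (j + 1) = pvH mx M' i j - pvM mx i j + pvM mx i (j + M') := by
  have h1 : pvH mx M' i (j+1) + pvM mx i j = pvH mx M' i j + pvM mx i (j + M') := by
    have ha := Finset.sum_range_succ' (fun b => pvM mx i (j + b)) M'
    have hb := Finset.sum_range_succ (fun b => pvM mx i (j + b)) M'
    simp only [pvH]
    simp only [Nat.add_zero] at ha
    rw [show (∑ b ∈ Finset.range M', pvM mx i (j + 1 + b)) + pvM mx i j
          = ∑ b ∈ Finset.range (M' + 1), pvM mx i (j + b) by
        rw [ha]; congr 1; refine Finset.sum_congr rfl fun b _ => ?_; ring_nf]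
    rw [hb]
  linarith
lemma pvS_succ (mx : List (List Int)) (M' i j : Nat) :
    pvS mx M' (i + 1) j = pvS mx M' i j - pvH mx M' i j + pvH mx M' (i + M') j := by
  have h1 : pvS mx M' (i+1) j + pvH mx M' i j = pvS mx M' i j + pvH mx M' (i + M') j := by
    have ha := Finset.sum_range_succ' (fun a => pvH mx M' (i + a) j) M'
    have hb := Finset.sum_range_succ (fun a => pvH mx M' (i + a) j) M'
    simp only [pvS]
    simp only [Nat.add_zero] at ha
    rw [show (∑ a ∈ Finset.range M', pvH mx M' (i + 1 + a) j) + pvH mx M' i j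
          = ∑ a ∈ Finset.range (M' + 1), pvH mx M' (i + a) j by
        rw [ha]; congr 1; refine Finset.sum_congr rfl fun a _ => ?_; ring_nf]
    rw [hb]
  linarith
lemma pv_get2_natCast (xs : List (List Int)) (a b : Nat) :
    pvGet2 xs (a : Int) (b : Int) = (xs.getD a []).getD b 0 := by
  simp [pvGet2]
lemma pvState_getD (g : Nat → List Int) (R t : Nat) (row : List Int) (r : Nat) (hr : r < R) :
    (pvState g R t row).getD r [] = if r = t then row else g r := by
  simp [pvState, List.getD_eq_getElem?_getD, List.getElem?_range hr]
lemma pvState_set (g : Nat → List Int) (R t : Nat) (row x : List Int) :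
    (pvState g R t row).set t x = pvState g R t x := by
  apply List.ext_getElem
  · simp [pvState]
  · intro n h1 h2
    rw [List.getElem_set]
    simp only [pvState, List.getElem_map, List.getElem_range]
    by_cases hn : t = n
    · simp [← hn]
    · simp [hn, Ne.symm hn]
lemma pvPartial_getD (target : Nat → Int) (C s u : Nat) (hu : u < s) :
    (pvPartial target C s).getD u 0 = target u := by
  rw [pvPartial, List.getD_append _ _ _ _ (by simp [hu])]
  simp [List.getD_eq_getElem?_getD, hu]
lemma pvPartial_set (target : Nat → Int) (C s : Nat) (hs : s < C) :
    (pvPartial target C s).set s (target s) = pvPartial target C (s + 1) := by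
  rw [pvPartial, List.set_append_right _ _ (by simp)]
  simp only [List.length_map, List.length_range, Nat.sub_self]
  rw [show C - s = (C - (s+1)) + 1 by omega, List.replicate_succ, List.set_cons_zero]
  rw [pvPartial, List.range_succ, List.map_append]
  simp

lemma pvFill (g : Nat → List Int) (R t C : Nat) (ht : t < R)
    (ti : Int) (hti : ti = (t : Int))
    (f : List (List Int) → Int → Int) (target : Nat → Int) (s : Nat) (a : Int) (ha : a = (s : Int)) :
    ∀ n, s + n ≤ C →
    (∀ u, u < n → f (pvState g R t (pvPartial target C (s + u))) (a + (u : Int)) = target (s + u)) →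
    ((List.range n).map (fun (k : Nat) => a + (k : Int))).foldl
      (fun ss j => pvSet2 ss ti j (f ss j)) (pvState g R t (pvPartial target C s))
    = pvState g R t (pvPartial target C (s + n)) := by
  intro n
  induction n with
  | zero => intro _ _; simp
  | succ n ih =>
    intro hC hf
    rw [pv_peel (fun (k : Nat) => a + (k : Int)) n, List.foldl_append,
        ih (by omega) (fun u hu => hf u (by omega))]
    simp only [List.foldl_cons, List.foldl_nil]
    rw [hf n (by omega)]
    unfold pvSet2
    rw [hti, PySem.List.pyGetD_natCast, pvState_getD g R t _ t ht, if_pos rfl]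
    rw [show a + (n : Int) = ((s + n : Nat) : Int) by rw [ha]; push_cast; ring]
    rw [PySem.List.pySetD_natCast, PySem.List.pySetD_natCast]
    rw [pvPartial_set target C (s+n) (by omega), pvState_set]
    rw [show s + (n+1) = (s+n) + 1 by omega]

-- A's horizontal-strip table
lemma pv_hs (mx : List (List Int)) (N M : Int) (M' N' K' : Nat)
    (hM : M = (M' : Int)) (hN : N = (N' : Int)) (hKeq : K' = N' - M' + 1) (hMN : M' ≤ N')
    (hlen : ∀ r, r < N' → N' ≤ (mx.getD r []).length) :
    ((List.range N').map (fun (k : Nat) => ((k : Nat) : Int))).foldl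
      (fun hs i =>
        ((List.range (K'-1)).map (fun (k : Nat) => (1 : Int) + (k : Int))).foldl
          (fun hs j => pvSet2 hs i j
            (pvGet2 hs i (j - 1) - pvGet2 mx i (j - 1) + pvGet2 mx i (j + M - 1)))
          (pvSet2 hs i 0 (PySem.List.slice (PySem.List.pyGetD mx i []) (some 0) (some M)).sum))
      (List.replicate N' (List.replicate K' 0))
    = (List.range N').map (fun i => (List.range K').map (fun j => pvH mx M' i j)) := by
  have hK1 : 1 ≤ K' := by omega
  have base : List.replicate N' (List.replicate K' (0:Int)) =
      (List.range N').map (fun r => if r < 0 then (List.range K').map (fun j => pvH mx M' r j) else List.replicate K' 0) := by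
    rw [show (fun r => if r < 0 then (List.range K').map (fun j => pvH mx M' r j) else List.replicate K' (0:Int))
          = (fun _ : Nat => List.replicate K' (0:Int)) from funext (fun r => by simp)]
    rw [List.map_const', List.length_range]
  have main : ∀ T, T ≤ N' →
      ((List.range T).map (fun (k : Nat) => ((k : Nat) : Int))).foldl
        (fun hs i =>
          ((List.range (K'-1)).map (fun (k : Nat) => (1 : Int) + (k : Int))).foldl
            (fun hs j => pvSet2 hs i j
              (pvGet2 hs i (j - 1) - pvGet2 mx i (j - 1) + pvGet2 mx i (j + M - 1)))
            (pvSet2 hs i 0 (PySem.List.slice (PySem.List.pyGetD mx i []) (some 0) (some M)).sum))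
        (List.replicate N' (List.replicate K' 0))
      = (List.range N').map (fun r => if r < T then (List.range K').map (fun j => pvH mx M' r j) else List.replicate K' 0) := by
    intro T
    induction T with
    | zero => intro _; simp only [List.range_zero, List.map_nil, List.foldl_nil]; exact base
    | succ T ih =>
      intro hT
      rw [pv_peel (fun (k : Nat) => ((k : Nat) : Int)) T, List.foldl_append, ih (by omega)]
      simp only [List.foldl_cons, List.foldl_nil]
      set gT : Nat → List Int := fun r => if r < T then (List.range K').map (fun j => pvH mx M' r j) else List.replicate K' 0 with hgT
      have hstate : (List.range N').map gT = pvState gT N' T (List.replicate K' 0) := by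
        unfold pvState
        refine List.map_congr_left fun r _ => ?_
        by_cases h : r = T
        · simp [h, hgT]
        · simp [h]
      -- stage 1: the first window sum
      have hv0 : (PySem.List.slice (PySem.List.pyGetD mx (T : Int) []) (some 0) (some M)).sum
          = pvH mx M' T 0 := by
        rw [PySem.List.pyGetD_natCast, PySem.List.slice_zero_start,
            PySem.List.slice_to _ (by omega), hM]
        rw [Int.toNat_natCast]
        rw [pv_sum_take _ _ (le_trans hMN (hlen T (by omega)))]
        simp [pvH, pvM]
      have hstage1 : pvSet2 ((List.range N').map gT) (T : Int) 0
            (PySem.List.slice (PySem.List.pyGetD mx (T : Int) []) (some 0) (some M)).sum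
          = pvState gT N' T (pvPartial (fun j => pvH mx M' T j) K' 1) := by
        rw [hv0, hstate]
        unfold pvSet2
        rw [PySem.List.pyGetD_natCast, pvState_getD gT N' T _ T (by omega), if_pos rfl]
        rw [PySem.List.pySetD_natCast]
        rw [PySem.List.pySetD_of_nonneg (h := by norm_num), Int.toNat_zero]
        rw [show List.replicate K' (0:Int) = pvPartial (fun j => pvH mx M' T j) K' 0 by simp [pvPartial]]
        rw [pvPartial_set _ _ _ (by omega), pvState_set]
      rw [hstage1]
      -- stage 2: the sliding window, via pvFill
      rw [show (1:Nat) = 0 + 1 from rfl] at hstage1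
      rw [pvFill gT N' T K' (by omega) (T : Int) rfl
            (fun ss j => pvGet2 ss (T : Int) (j - 1) - pvGet2 mx (T : Int) (j - 1) + pvGet2 mx (T : Int) (j + M - 1))
            (fun j => pvH mx M' T j) 1 (1 : Int) (by norm_num)
            (K' - 1) (by omega) ?_]
      · rw [show 1 + (K' - 1) = K' by omega]
        rw [show pvPartial (fun j => pvH mx M' T j) K' K'
              = (List.range K').map (fun j => pvH mx M' T j) by simp [pvPartial]]
        unfold pvState
        refine List.map_congr_left fun r _ => ?_
        by_cases h : r = T
        · simp [h, hgT]
        · simp only [hgT, if_neg h]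
          by_cases h2 : r < T
          · rw [if_pos h2, if_pos (by omega)]
          · rw [if_neg h2, if_neg (by omega)]
      · intro u hu
        have e1 : (1 : Int) + (u : Int) - 1 = (u : Int) := by ring
        have e2 : (1 : Int) + (u : Int) + M - 1 = ((u + M' : Nat) : Int) := by rw [hM]; push_cast; ring
        simp only [e1, e2]
        rw [pv_get2_natCast, pv_get2_natCast]
        unfold pvGet2
        rw [PySem.List.pyGetD_natCast, pvState_getD gT N' T _ T (by omega), if_pos rfl,
            PySem.List.pyGetD_natCast, pvPartial_getD _ _ _ _ (by omega)]
        have := pvH_succ mx M' T u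
        simp only [pvM] at this
        rw [show 1 + u = u + 1 by omega]
        linarith
  rw [main N' (le_refl _)]
  refine List.map_congr_left fun r hr => ?_
  simp only [List.mem_range] at hr
  rw [if_pos hr]

-- A's square table, first row (loop over j)
lemma pv_ss1 (mx : List (List Int)) (M' N' K' : Nat)
    (hKeq : K' = N' - M' + 1) (hMN : M' ≤ N') :
    ((List.range K').map (fun (k : Nat) => (0 : Int) + (k : Int))).foldl
      (fun ss j => pvSet2 ss 0 j
        ((((List.range M').map (fun (k : Nat) => ((k : Nat) : Int))).map
          (fun i => pvGet2 ((List.range N').map (fun r => (List.range K').map (fun c => pvH mx M' r c))) i j)).sum))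
      (List.replicate K' (List.replicate K' 0))
    = (List.range K').map (fun r => if r < 1 then (List.range K').map (fun c => pvS mx M' r c) else List.replicate K' 0) := by
  have hK1 : 1 ≤ K' := by omega
  have hinit : List.replicate K' (List.replicate K' (0:Int))
      = pvState (fun _ => List.replicate K' 0) K' 0 (pvPartial (fun c => pvS mx M' 0 c) K' 0) := by
    unfold pvState
    rw [show (fun r => if r = 0 then pvPartial (fun c => pvS mx M' 0 c) K' 0 else List.replicate K' (0:Int))
          = (fun _ : Nat => List.replicate K' (0:Int)) from funext (fun r => by
            by_cases h : r = 0 <;> simp [h, pvPartial])]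
    rw [List.map_const', List.length_range]
  rw [hinit]
  rw [show (0 : Nat) = 0 + 0 from rfl] at hinit
  rw [pvFill (fun _ => List.replicate K' 0) K' 0 K' (by omega) (0 : Int) (by norm_num)
        _ (fun c => pvS mx M' 0 c) 0 (0 : Int) (by norm_num) K' (by omega) ?_]
  · unfold pvState
    refine List.map_congr_left fun r _ => ?_
    have hp : pvPartial (fun c => pvS mx M' 0 c) K' (0 + K') = (List.range K').map (fun c => pvS mx M' 0 c) := by
      simp [pvPartial]
    by_cases h : r = 0
    · rw [if_pos h, if_pos (by omega), hp, h]
    · rw [if_neg h, if_neg (by omega)]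
  · intro u hu
    simp only [List.map_map, Function.comp_def, zero_add]
    have hentry : ∀ k ∈ List.range M',
        pvGet2 ((List.range N').map (fun r => (List.range K').map (fun c => pvH mx M' r c))) ((k:Nat) : Int) ((u:Nat) : Int)
        = pvH mx M' k u := by
      intro k hk
      simp only [List.mem_range] at hk
      rw [pv_get2_natCast, PySem.List.getD_map_range _ _ _ _ (by omega),
          PySem.List.getD_map_range _ _ _ _ (by omega)]
    rw [List.map_congr_left hentry, pv_sum_map_range]
    simp [pvS]

-- A's square table, remaining rows (sliding window downward)
lemma pv_ss2 (mx : List (List Int)) (M N : Int) (M' N' K' : Nat)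
    (hM : M = (M' : Int)) (hKeq : K' = N' - M' + 1) (hMN : M' ≤ N') :
    ∀ U, U ≤ K' - 1 →
    ((List.range U).map (fun (k : Nat) => (1 : Int) + (k : Int))).foldl
      (fun ss i =>
        ((List.range K').map (fun (k : Nat) => (0 : Int) + (k : Int))).foldl
          (fun ss j => pvSet2 ss i j
            (pvGet2 ss (i - 1) j
              - pvGet2 ((List.range N').map (fun r => (List.range K').map (fun c => pvH mx M' r c))) (i - 1) j
              + pvGet2 ((List.range N').map (fun r => (List.range K').map (fun c => pvH mx M' r c))) (i + M - 1) j)) ss)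
      ((List.range K').map (fun r => if r < 1 then (List.range K').map (fun c => pvS mx M' r c) else List.replicate K' 0))
    = (List.range K').map (fun r => if r < U + 1 then (List.range K').map (fun c => pvS mx M' r c) else List.replicate K' 0) := by
  intro U
  induction U with
  | zero => intro _; simp
  | succ U ih =>
    intro hU
    rw [pv_peel (fun (k : Nat) => (1 : Int) + (k : Int)) U, List.foldl_append, ih (by omega)]
    simp only [List.foldl_cons, List.foldl_nil]
    set gU : Nat → List Int := fun r => if r < U + 1 then (List.range K').map (fun c => pvS mx M' r c) else List.replicate K' 0 with hgU
    have hstate : (List.range K').map gU = pvState gU K' (U + 1) (pvPartial (fun c => pvS mx M' (U+1) c) K' 0) := by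
      unfold pvState
      refine List.map_congr_left fun r _ => ?_
      by_cases h : r = U + 1
      · rw [if_pos h, hgU]
        simp only [h]
        rw [if_neg (by omega)]
        simp [pvPartial]
      · rw [if_neg h]
    rw [hstate]
    rw [pvFill gU K' (U + 1) K' (by omega) ((1 : Int) + (U : Int)) (by push_cast; ring)
          _ (fun c => pvS mx M' (U+1) c) 0 (0 : Int) (by norm_num) K' (by omega) ?_]
    · unfold pvState
      refine List.map_congr_left fun r _ => ?_
      have hp : pvPartial (fun c => pvS mx M' (U+1) c) K' (0 + K') = (List.range K').map (fun c => pvS mx M' (U+1) c) := by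
        simp [pvPartial]
      by_cases h : r = U + 1
      · rw [if_pos h, if_pos (by omega), hp, h]
      · rw [if_neg h]
        simp only [hgU]
        by_cases h2 : r < U + 1
        · rw [if_pos h2, if_pos (by omega)]
        · rw [if_neg h2, if_neg (by omega)]
    · intro v hv
      have e1 : (1 : Int) + (U : Int) - 1 = ((U : Nat) : Int) := by push_cast; ring
      have e2 : (1 : Int) + (U : Int) + M - 1 = ((U + M' : Nat) : Int) := by rw [hM]; push_cast; ring
      have e3 : (0 : Int) + (v : Int) = ((v : Nat) : Int) := by push_cast; ring
      simp only [e1, e2, e3]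
      rw [pv_get2_natCast, pv_get2_natCast]
      unfold pvGet2
      rw [PySem.List.pyGetD_natCast, pvState_getD gU K' (U+1) _ U (by omega), if_neg (by omega), hgU]
      simp only
      rw [if_pos (by omega), PySem.List.pyGetD_natCast,
          PySem.List.getD_map_range _ _ _ _ (by omega),
          PySem.List.getD_map_range _ _ _ _ (by omega),
          PySem.List.getD_map_range _ _ _ _ (by omega),
          PySem.List.getD_map_range _ _ _ _ (by omega),
          PySem.List.getD_map_range _ _ _ _ (by omega)]
      simp only [Nat.zero_add]
      have := pvS_succ mx M' U v
      linarith

lemma pvP_succ (mx : List (List Int)) (i j : Nat) :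
    pvP mx (i + 1) (j + 1) = pvP mx i (j + 1) + pvP mx (i + 1) j - pvP mx i j + pvM mx i j := by
  simp [pvP, Finset.sum_range_succ]; ring

lemma pvP_corner (mx : List (List Int)) (M' i j : Nat) :
    pvP mx (i + M') (j + M') - pvP mx i (j + M') - pvP mx (i + M') j + pvP mx i j
      = pvS mx M' i j := by
  simp only [pvP, pvS, pvH]
  rw [Finset.sum_range_add (fun a => ∑ b ∈ Finset.range (j + M'), pvM mx a b) i M',
      Finset.sum_range_add (fun a => ∑ b ∈ Finset.range j, pvM mx a b) i M']
  have h : ∀ a, ∑ b ∈ Finset.range (j + M'), pvM mx (i+a) b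
      = (∑ b ∈ Finset.range j, pvM mx (i+a) b) + ∑ b ∈ Finset.range M', pvM mx (i+a) (j+b) := by
    intro a; exact Finset.sum_range_add (fun b => pvM mx (i+a) b) j M'
  simp only [h]
  rw [Finset.sum_add_distrib]
  ring

lemma pv_getD_map_range (f : Nat → List Int) (m r : Nat) (hr : r < m) :
    ((List.range m).map f).getD r [] = f r :=
  PySem.List.getD_map_range f m r [] hr


lemma pv_peel_row (c : Nat → List Int) (n : Nat) :
    (List.range (n+1)).map c = (List.range n).map c ++ [c n] := by
  rw [List.range_succ, List.map_append, List.map_cons, List.map_nil]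

-- B inner loop: one prefix row
lemma pv_Prow (mx : List (List Int)) (N' t : Nat) (ht : t < N') :
    ∀ V, V ≤ N' →
    ((List.range V).map (fun (k : Nat) => (1 : Int) + (k : Int))).foldl
      (fun (row : List Int) j =>
        row ++ [pvGet2 ((List.range (t+1)).map (fun i => (List.range (N'+1)).map (fun j => pvP mx i j))) ((1 : Int) + (t : Int) - 1) j
                + PySem.List.pyGetD row (j - 1) 0
                - pvGet2 ((List.range (t+1)).map (fun i => (List.range (N'+1)).map (fun j => pvP mx i j))) ((1 : Int) + (t : Int) - 1) (j - 1)
                + pvGet2 mx ((1 : Int) + (t : Int) - 1) (j - 1)]) [0]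
    = (List.range (V+1)).map (fun j => pvP mx (t+1) j) := by
  intro V
  induction V with
  | zero => simp [pvP]
  | succ V ih =>
    intro hV
    rw [pv_peel (fun k => (1:Int)+(k:Int)) V, List.foldl_append, ih (by omega)]
    simp only [List.foldl_cons, List.foldl_nil]
    have e1 : (1 : Int) + (t : Int) - 1 = (t : Int) := by ring
    have e2 : (1 : Int) + (V : Int) - 1 = (V : Int) := by ring
    have e3 : (1 : Int) + (V : Int) = ((V + 1 : Nat) : Int) := by push_cast; ring
    rw [e1, e2, e3]
    rw [pv_get2_natCast, pv_get2_natCast, pv_get2_natCast]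
    rw [pv_getD_map_range _ _ _ (by omega)]
    rw [PySem.List.pyGetD_natCast]
    rw [PySem.List.getD_map_range _ _ _ _ (by omega), PySem.List.getD_map_range _ _ _ _ (by omega),
        PySem.List.getD_map_range _ _ _ _ (by omega)]
    show _ ++ [pvP mx t (V+1) + pvP mx (t+1) V - pvP mx t V + pvM mx t V] = _
    rw [← pvP_succ]
    rw [pv_peel (fun j => pvP mx (t+1) j) (V+1)]

-- B outer loop: the whole prefix table
lemma pv_Ptable (mx : List (List Int)) (N' : Nat) :
    ∀ T, T ≤ N' →
    ((List.range T).map (fun (k : Nat) => (1 : Int) + (k : Int))).foldl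
      (fun (P : List (List Int)) i =>
        P ++ [((List.range N').map (fun (k : Nat) => (1 : Int) + (k : Int))).foldl
          (fun (row : List Int) j =>
            row ++ [pvGet2 P (i - 1) j + PySem.List.pyGetD row (j - 1) 0
                    - pvGet2 P (i - 1) (j - 1) + pvGet2 mx (i - 1) (j - 1)]) [0]])
      [List.replicate (N'+1) 0]
    = (List.range (T+1)).map (fun i => (List.range (N'+1)).map (fun j => pvP mx i j)) := by
  intro T
  induction T with
  | zero =>
    simp only [List.range_zero, List.map_nil, List.foldl_nil, List.range_one, List.map_cons]
    have h0 : (List.range (N'+1)).map (fun j => pvP mx 0 j) = List.replicate (N'+1) (0:Int) := by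
      rw [show (fun j => pvP mx 0 j) = (fun _ : Nat => (0:Int)) from funext (fun j => by simp [pvP])]
      rw [List.map_const', List.length_range]
    intro _
    rw [show (0:Nat)+1 = 1 from rfl, List.range_one, List.map_cons, List.map_nil, h0]
  | succ T ih =>
    intro hT
    rw [pv_peel (fun k => (1:Int)+(k:Int)) T, List.foldl_append, ih (by omega)]
    simp only [List.foldl_cons, List.foldl_nil]
    rw [pv_Prow mx N' T (by omega) N' (le_refl _)]
    rw [pv_peel_row (fun i => (List.range (N'+1)).map (fun j => pvP mx i j)) (T+1)]

lemma pv_A_eq (mx : List (List Int)) (N M : Int) (h0 : 0 ≤ M) (h1 : M ≤ N)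
    (h2 : N ≤ (mx.length : Int)) (h3 : ∀ row ∈ mx.take N.toNat, N ≤ (row.length : Int)) :
    compute_square_sums mx N M =
      (List.range (N - M + 1).toNat).map (fun i =>
        (List.range (N - M + 1).toNat).map (fun j => pvS mx M.toNat i j)) := by
  have hN0 : 0 ≤ N := le_trans h0 h1
  set N' := N.toNat with hN'
  set M' := M.toNat with hM'
  set K' := (N - M + 1).toNat with hK'
  have hN : N = (N' : Int) := (Int.toNat_of_nonneg hN0).symm
  have hM : M = (M' : Int) := (Int.toNat_of_nonneg h0).symm
  have hMN : M' ≤ N' := by omega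
  have hKeq : K' = N' - M' + 1 := by omega
  have hlen : ∀ r, r < N' → N' ≤ (mx.getD r []).length := by
    intro r hr
    have hrl : r < mx.length := by omega
    have hmem : mx[r] ∈ mx.take N' := by
      have : (mx.take N')[r]'(by simp [List.length_take]; omega) = mx[r] := List.getElem_take
      rw [← this]
      exact List.getElem_mem _
    have := h3 _ hmem
    rw [List.getD_eq_getElem _ _ hrl]
    omega
  have hrA : PySem.List.pyRange 0 N 1 = (List.range N').map (fun (k : Nat) => ((k : Nat) : Int)) :=
    PySem.List.pyRange_zero N
  have hrI : PySem.List.pyRange 1 (N - M + 1) 1 = (List.range (K' - 1)).map (fun (k : Nat) => (1 : Int) + (k : Int)) := by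
    have e : (N - M + 1 - 1).toNat = K' - 1 := by omega
    rw [PySem.List.pyRange_one, e]
  have hrK0 : PySem.List.pyRange 0 (N - M + 1) 1 = (List.range K').map (fun (k : Nat) => (0 : Int) + (k : Int)) := by
    have e : (N - M + 1 - 0).toNat = K' := by omega
    rw [PySem.List.pyRange_one, e]
  have hrM : PySem.List.pyRange 0 M 1 = (List.range M').map (fun (k : Nat) => ((k : Nat) : Int)) :=
    PySem.List.pyRange_zero M
  simp only [compute_square_sums, hrA, hrI, hrK0, hrM]
  rw [pv_hs mx N M M' N' K' hM hN hKeq hMN hlen]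
  rw [pv_ss1 mx M' N' K' hKeq hMN]
  rw [pv_ss2 mx M N M' N' K' hM hKeq hMN (K' - 1) (le_refl _)]
  refine List.map_congr_left fun r hr => ?_
  simp only [List.mem_range] at hr
  rw [if_pos (by omega)]

lemma pv_A_empty (mx : List (List Int)) (N M : Int) (hN : N ≤ 0) (hK : N - M + 1 ≤ 0) :
    compute_square_sums mx N M = [] := by
  simp only [compute_square_sums, PySem.List.pyRange_one_eq_nil hN,
    PySem.List.pyRange_one_eq_nil hK, PySem.List.pyRange_one_eq_nil (show N - M + 1 ≤ 1 by omega),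
    List.foldl_nil, Int.toNat_of_nonpos hK, List.replicate_zero]

lemma pv_B_eq (mx : List (List Int)) (N M : Int) (h0 : 0 ≤ M) (h1 : M ≤ N) :
    compute_square_sums_alt mx N M =
      (List.range (N - M + 1).toNat).map (fun i =>
        (List.range (N - M + 1).toNat).map (fun j => pvS mx M.toNat i j)) := by
  have hN0 : 0 ≤ N := le_trans h0 h1
  set N' := N.toNat with hN'
  set M' := M.toNat with hM'
  set K' := (N - M + 1).toNat with hK'
  have hN : N = (N' : Int) := (Int.toNat_of_nonneg hN0).symm
  have hM : M = (M' : Int) := (Int.toNat_of_nonneg h0).symm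
  have hMN : M' ≤ N' := by omega
  have hKeq : K' = N' - M' + 1 := by omega
  have hrange1 : PySem.List.pyRange 1 (N + 1) 1 = (List.range N').map (fun (k : Nat) => (1 : Int) + (k : Int)) := by
    have e : (N + 1 - 1).toNat = N' := by omega
    rw [PySem.List.pyRange_one, e]
  have hrange0 : PySem.List.pyRange 0 (N - M + 1) 1 = (List.range K').map (fun (k : Nat) => ((k : Nat) : Int)) := by
    rw [PySem.List.pyRange_zero]
  have hrep : (N + 1).toNat = N' + 1 := by omega
  simp only [compute_square_sums_alt, hrange1, hrange0, hrep]
  rw [pv_Ptable mx N' N' (le_refl _)]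
  simp only [List.map_map, Function.comp_def]
  refine List.map_congr_left fun a ha => ?_
  refine List.map_congr_left fun b hb => ?_
  simp only [List.mem_range] at ha hb
  have ea : ((a : Nat) : Int) + M = ((a + M' : Nat) : Int) := by rw [hM]; push_cast; ring
  have eb : ((b : Nat) : Int) + M = ((b + M' : Nat) : Int) := by rw [hM]; push_cast; ring
  rw [ea, eb]
  rw [pv_get2_natCast, pv_get2_natCast, pv_get2_natCast, pv_get2_natCast]
  repeat rw [PySem.List.getD_map_range _ _ _ _ (by omega)]
  exact pvP_corner mx M' a b

lemma pv_B_empty (mx : List (List Int)) (N M : Int) (hK : N - M + 1 ≤ 0) :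
    compute_square_sums_alt mx N M = [] := by
  simp only [compute_square_sums_alt, PySem.List.pyRange_one_eq_nil hK, List.map_nil]

-- ===== VERDICT (by name: the statement is the Claim_ definition above) =====
theorem compute_square_sums_spec : Claim_equal_compute_square_sums := by
  intro mx N M _ hpre
  unfold Spec_compute_square_sums
  rcases hpre with ⟨h0, h1, h2, h3⟩ | ⟨hN, hK⟩
  · rw [pv_A_eq mx N M h0 h1 h2 h3, pv_B_eq mx N M h0 h1]
  · rw [pv_A_empty mx N M hN hK, pv_B_empty mx N M hK]
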